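-- pv_equiv track=rewrite | github.com/MichelGerding/HBO-ICT-opdrachten-pgm-2 | week_8/wk8ex2.py | centered_average
-- ===== SOURCE A (Python) =====
-- def centered_average(nums):
--   """ return the centered average of the list nums
--       Argument: nums a list of numbers
--   """
--
--   # max size of 64 bit intiger
--   min_val = 18446744073709551615
--   max_val = -18446744073709551615
--
--   total = 0
--   for i in nums:
--     total += i
--
--     if min_val > i:
--       min_val = i
--     if max_val < i:
--       max_val = i
--
--   total -= (min_val + max_val)
--   return total // (len(nums) -2)
-- ===== SOURCE B (Python) =====
-- def centered_average(nums):
--   """ return the centered average of the list nums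
--       Argument: nums a list of numbers
--   """
--   trimmed = sorted(nums)[1:-1]
--   return sum(trimmed) // (len(nums) - 2)
-- ===== Notes on version B (the rewrite author's own statement) =====
-- stated objective: alternative
-- what changed: Replaces the single-pass accumulation loop with 64-bit sentinel min/max tracking by sorting the list and summing the slice [1:-1], i.e. trimming one smallest and one largest element positionally instead of tracking extrema arithmetically.
-- outside the precondition, e.g. on centered_average([5]): A returns 5, B returns 0; on centered_average([1, 2]): A raises ZeroDivisionError, B raises ZeroDivisionError
import Mathlib
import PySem

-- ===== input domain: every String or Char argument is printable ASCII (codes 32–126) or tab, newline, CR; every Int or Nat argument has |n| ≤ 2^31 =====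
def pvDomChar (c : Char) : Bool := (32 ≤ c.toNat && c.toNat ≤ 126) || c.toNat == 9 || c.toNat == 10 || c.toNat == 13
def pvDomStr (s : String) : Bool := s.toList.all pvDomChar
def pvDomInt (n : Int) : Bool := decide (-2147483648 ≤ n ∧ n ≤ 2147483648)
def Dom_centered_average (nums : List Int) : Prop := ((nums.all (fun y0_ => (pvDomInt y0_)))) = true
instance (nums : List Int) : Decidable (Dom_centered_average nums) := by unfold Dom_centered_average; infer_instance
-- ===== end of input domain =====

-- B sorts the list and sums the slice [1:-1] (trimming one smallest and one largest element
-- positionally) instead of A's single accumulation loop with 64-bit sentinel min/max tracking.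


-- ===== PORT A =====
def centered_average (nums : List Int) : Int :=
  let st := nums.foldl
    (fun (st : Int × Int × Int) i =>
      let total := st.2.2 + i
      let mn := if st.1 > i then i else st.1
      let mx := if st.2.1 < i then i else st.2.1
      (mn, mx, total))
    (18446744073709551615, -18446744073709551615, 0)
  PySem.Int.floordiv (st.2.2 - (st.1 + st.2.1)) ((nums.length : Int) - 2)

-- ===== PORT B =====
def centered_average_alt (nums : List Int) : Int :=
  let trimmed := PySem.List.slice (PySem.List.sorted nums (fun x => x) false) (some 1) (some (-1))
  PySem.Int.floordiv trimmed.sum ((nums.length : Int) - 2)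

-- ===== PRECONDITION & SPEC =====
-- Pre_ excludes the two-element lists, on which A raises ZeroDivisionError (len - 2 = 0), and the
-- one-element lists, an unspecified corner where A's sentinel double-subtraction returns the element
-- itself while B's positional trim returns 0 — both defensible readings of 'centered average' of
-- fewer than three numbers.
def Pre_centered_average (nums : List Int) : Prop := nums.length ≠ 1 ∧ nums.length ≠ 2
instance (nums : List Int) : Decidable (Pre_centered_average nums) := by unfold Pre_centered_average; infer_instance
def pvWitness_centered_average : List Int := ([1, 2, 3])
def Spec_centered_average (nums : List Int) (out : Int) : Prop := out = centered_average_alt nums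
instance (nums : List Int) (out : Int) : Decidable (Spec_centered_average nums out) := by unfold Spec_centered_average; infer_instance

-- ===== CLAIM (what is proved, stated in full; the proofs are below) =====
def Claim_equal_centered_average : Prop := ∀ (nums : List Int), Dom_centered_average nums → Pre_centered_average nums → Spec_centered_average nums (centered_average nums)

-- ===== LEMMAS AND PROOFS =====

-- A's loop computes (running min, running max, running sum) of its state.
lemma ca_fold_inv (xs : List Int) (mn mx t : Int) :
    xs.foldl
      (fun (st : Int × Int × Int) i =>
        let total := st.2.2 + i
        let m := if st.1 > i then i else st.1
        let M := if st.2.1 < i then i else st.2.1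
        (m, M, total))
      (mn, mx, t)
    = (xs.foldl min mn, xs.foldl max mx, t + xs.sum) := by
  induction xs generalizing mn mx t with
  | nil => simp
  | cons x xs ih =>
    simp only [List.foldl_cons, List.sum_cons, ih]
    have h1 : (if mn > x then x else mn) = min mn x := by
      rw [Int.min_def]; split_ifs <;> omega
    have h2 : (if mx < x then x else mx) = max mx x := by
      rw [Int.max_def]; split_ifs <;> omega
    rw [h1, h2]; ring_nf

-- xs[1:-1] is tail-then-dropLast for a list of length ≥ 2.
lemma ca_slice_eq (s : List Int) (h : 2 ≤ s.length) :
    PySem.List.slice s (some 1) (some (-1)) = s.tail.dropLast := by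
  simp [PySem.List.slice, PySem.List.clampIdx]
  have hne : s ≠ [] := by rintro rfl; simp at h
  rw [if_neg hne]
  have h1 : min 1 s.length = 1 := by omega
  have h2 : ((s.length : Int) + -1).toNat = s.length - 1 := by omega
  rw [h1, h2, ← List.drop_one, List.dropLast_eq_take]
  congr 1
  simp

-- the last element of a ≤-sorted list bounds every element
lemma ca_le_getLast (s : List Int) (h : s.Pairwise (· ≤ ·)) (hne : s ≠ [])
    (y : Int) (hy : y ∈ s) : y ≤ s.getLast hne := by
  induction s with
  | nil => simp at hy
  | cons a t ih =>
    rcases List.mem_cons.mp hy with heq | hy'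
    · subst heq
      cases t with
      | nil => simp
      | cons b u =>
        rw [List.getLast_cons (by simp)]
        exact (List.pairwise_cons.mp h).1 _ (List.getLast_mem _)
    · have hne' : t ≠ [] := by rintro rfl; simp at hy'
      rw [List.getLast_cons hne']
      exact ih (List.pairwise_cons.mp h).2 hne' hy'

-- sum of dropLast
lemma ca_sum_dropLast (s : List Int) (hne : s ≠ []) :
    s.dropLast.sum = s.sum - s.getLast hne := by
  have h := congrArg List.sum (List.dropLast_concat_getLast hne)
  simp at h
  omega

-- any sorted rearrangement of x :: xs: trimming both ends removes min and max from the sum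
lemma ca_sorted_sum (x : Int) (xs : List Int) (s : List Int)
    (hperm : s.Perm (x :: xs)) (hpw : s.Pairwise (· ≤ ·)) (hlen : 3 ≤ (x :: xs).length) :
    s.tail.dropLast.sum = (x :: xs).sum - xs.foldl min x - xs.foldl max x := by
  cases s with
  | nil => exact absurd hperm.length_eq (by simp)
  | cons a t =>
  have hlens : t.length + 1 = (x :: xs).length := by
    simpa using hperm.length_eq
  have htne : t ≠ [] := by
    rintro rfl
    simp only [List.length_nil, List.length_cons] at hlens hlen
    omega
  -- head of the sorted list = A's running min
  have hmn : a = xs.foldl min x := by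
    have hfold_mem : xs.foldl min x ∈ x :: xs :=
      ((List.min?_eq_some_iff (xs := x :: xs) (a := xs.foldl min x)).mp rfl).1
    have h1 : a ≤ xs.foldl min x := by
      rcases List.mem_cons.mp (hperm.mem_iff.mpr hfold_mem) with heq | hmem
      · omega
      · exact (List.pairwise_cons.mp hpw).1 _ hmem
    have h2 : xs.foldl min x ≤ a :=
      ((List.min?_eq_some_iff (xs := x :: xs) (a := xs.foldl min x)).mp rfl).2 a
        (hperm.mem_iff.mp (by simp))
    omega
  -- last of the sorted list = A's running max
  have hmx : t.getLast htne = xs.foldl max x := by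
    have hfold_mem : xs.foldl max x ∈ a :: t :=
      hperm.mem_iff.mpr ((List.max?_eq_some_iff (xs := x :: xs) (a := xs.foldl max x)).mp rfl).1
    have h1 : xs.foldl max x ≤ (a :: t).getLast (by simp) :=
      ca_le_getLast (a :: t) hpw (by simp) _ hfold_mem
    have h2 : t.getLast htne ≤ xs.foldl max x :=
      ((List.max?_eq_some_iff (xs := x :: xs) (a := xs.foldl max x)).mp rfl).2 _
        (hperm.mem_iff.mp (by
          have : t.getLast htne ∈ t := List.getLast_mem htne
          exact List.mem_cons_of_mem a this))
    rw [List.getLast_cons htne] at h1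
    omega
  have hsum : a + t.sum = (x :: xs).sum := by
    have := hperm.sum_eq
    simpa using this
  simp only [List.tail_cons]
  rw [ca_sum_dropLast t htne, hmx]
  omega

-- ===== VERDICT (by name: the statement is the Claim_ definition above) =====
theorem centered_average_spec : Claim_equal_centered_average := by
  intro nums hdom hpre
  unfold Spec_centered_average
  cases nums with
  | nil => decide
  | cons x xs =>
    have hlen : 3 ≤ (x :: xs).length := by
      rcases hpre with ⟨h1, h2⟩
      simp only [List.length_cons] at h1 h2 ⊢
      omega
    have hxb : -2147483648 ≤ x ∧ x ≤ 2147483648 := by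
      simp [Dom_centered_average, pvDomInt] at hdom
      exact hdom.1
    unfold centered_average centered_average_alt
    simp only [ca_fold_inv, List.foldl_cons]
    have hmin : (if (18446744073709551615 : Int) > x then x else 18446744073709551615) = x := by
      split_ifs with h
      · rfl
      · omega
    have hmax : (if (-18446744073709551615 : Int) < x then x else -18446744073709551615) = x := by
      split_ifs with h
      · rfl
      · omega
    rw [hmin, hmax]
    congr 1
    have hperm := PySem.List.sorted_perm (x :: xs) (fun v => v) false
    have hpw : (PySem.List.sorted (x :: xs) (fun v => v) false).Pairwise (· ≤ ·) := by
      simpa using PySem.List.sorted_pairwise (x :: xs) (fun v => v)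
    rw [ca_slice_eq _ (by rw [hperm.length_eq]; simp only [List.length_cons] at hlen ⊢; omega)]
    rw [ca_sorted_sum x xs _ hperm hpw hlen]
    simp only [List.sum_cons]
    ring
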